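-- pv_equiv track=rewrite | github.com/YallaPapi/pubscrape | src/agents/tools/email_metrics_tool.py | _analyze_context_richness
-- ===== SOURCE A (Python) =====
-- from typing import Dict, Any, List, Optional
--
-- def _analyze_context_richness(candidates: List[Dict[str, Any]]) -> Dict[str, Any]:
--     """Analyze richness of context information"""
--     context_stats = {
--         'candidates_with_names': 0,
--         'candidates_with_titles': 0,
--         'candidates_with_departments': 0,
--         'candidates_with_phones': 0,
--         'candidates_with_full_context': 0
--     }
--
--     for candidate in candidates:
--         if candidate.get('associated_name'):
--             context_stats['candidates_with_names'] += 1
--         if candidate.get('associated_title'):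
--             context_stats['candidates_with_titles'] += 1
--         if candidate.get('associated_department'):
--             context_stats['candidates_with_departments'] += 1
--         if candidate.get('phone_number'):
--             context_stats['candidates_with_phones'] += 1
--
--         # Full context = at least 2 pieces of additional info
--         context_count = sum([
--             bool(candidate.get('associated_name')),
--             bool(candidate.get('associated_title')),
--             bool(candidate.get('associated_department')),
--             bool(candidate.get('phone_number'))
--         ])
--
--         if context_count >= 2:
--             context_stats['candidates_with_full_context'] += 1
--
--     return context_stats
-- ===== SOURCE B (Python) =====
-- def _analyze_context_richness(candidates):
--     """Column-wise: one independent count per statistic, assembled at the end."""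
--     names = sum(1 for c in candidates if c.get('associated_name'))
--     titles = sum(1 for c in candidates if c.get('associated_title'))
--     departments = sum(1 for c in candidates if c.get('associated_department'))
--     phones = sum(1 for c in candidates if c.get('phone_number'))
--     full = sum(1 for c in candidates
--                if (bool(c.get('associated_name')) + bool(c.get('associated_title'))
--                    + bool(c.get('associated_department')) + bool(c.get('phone_number'))) >= 2)
--     return {
--         'candidates_with_names': names,
--         'candidates_with_titles': titles,
--         'candidates_with_departments': departments,
--         'candidates_with_phones': phones,
--         'candidates_with_full_context': full,
--     }
-- ===== Notes on version B (the rewrite author's own statement) =====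
-- stated objective: alternative
-- what changed: Replaces A's single row-wise loop that increments five counters inside a shared dict with five independent column-wise counting passes (one sum-of-generator per statistic), assembling the result dict once at the end.
import Mathlib
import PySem

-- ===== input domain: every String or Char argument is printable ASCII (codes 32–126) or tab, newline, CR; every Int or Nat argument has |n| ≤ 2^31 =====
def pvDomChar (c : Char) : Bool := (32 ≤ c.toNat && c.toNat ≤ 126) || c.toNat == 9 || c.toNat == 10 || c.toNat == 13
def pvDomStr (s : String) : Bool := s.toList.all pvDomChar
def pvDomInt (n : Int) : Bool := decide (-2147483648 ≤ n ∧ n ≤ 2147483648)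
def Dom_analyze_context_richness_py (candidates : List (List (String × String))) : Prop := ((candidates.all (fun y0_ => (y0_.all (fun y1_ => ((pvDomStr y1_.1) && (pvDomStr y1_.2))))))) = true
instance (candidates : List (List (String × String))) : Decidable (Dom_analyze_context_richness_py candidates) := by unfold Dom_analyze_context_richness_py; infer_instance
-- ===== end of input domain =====

-- B restructures A's single row-wise loop (five counters updated in one shared dict) into five
-- independent column-wise counting passes assembled into the dict at the end (objective: alternative).

-- ===== PORT A =====
-- candidate.get(k) truthiness: a non-empty string value under the first matching key
def pvTruthyGet (c : List (String × String)) (k : String) : Bool :=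
  match (PySem.Dict.mk c).get? k with
  | some s => s != ""
  | none => false

def analyze_context_richness_py (candidates : List (List (String × String))) : List (String × Int) :=
  let context_stats : PySem.Dict String Int := PySem.Dict.mk
    [("candidates_with_names", 0), ("candidates_with_titles", 0),
     ("candidates_with_departments", 0), ("candidates_with_phones", 0),
     ("candidates_with_full_context", 0)]
  let final := candidates.foldl (fun d candidate =>
    let d := if pvTruthyGet candidate "associated_name" then d.modify "candidates_with_names" 0 (· + 1) else d
    let d := if pvTruthyGet candidate "associated_title" then d.modify "candidates_with_titles" 0 (· + 1) else d
    let d := if pvTruthyGet candidate "associated_department" then d.modify "candidates_with_departments" 0 (· + 1) else d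
    let d := if pvTruthyGet candidate "phone_number" then d.modify "candidates_with_phones" 0 (· + 1) else d
    let context_count : Int :=
      (if pvTruthyGet candidate "associated_name" then 1 else 0) +
      (if pvTruthyGet candidate "associated_title" then 1 else 0) +
      (if pvTruthyGet candidate "associated_department" then 1 else 0) +
      (if pvTruthyGet candidate "phone_number" then 1 else 0)
    if context_count ≥ 2 then d.modify "candidates_with_full_context" 0 (· + 1) else d)
    context_stats
  final.items

-- ===== PORT B =====
def pvFullContext (c : List (String × String)) : Bool :=
  ((if pvTruthyGet c "associated_name" then (1:Int) else 0) +
   (if pvTruthyGet c "associated_title" then 1 else 0) +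
   (if pvTruthyGet c "associated_department" then 1 else 0) +
   (if pvTruthyGet c "phone_number" then 1 else 0)) ≥ 2

def analyze_context_richness_py_alt (candidates : List (List (String × String))) : List (String × Int) :=
  let names : Int := ((candidates.filter (fun c => pvTruthyGet c "associated_name")).length : Int)
  let titles : Int := ((candidates.filter (fun c => pvTruthyGet c "associated_title")).length : Int)
  let departments : Int := ((candidates.filter (fun c => pvTruthyGet c "associated_department")).length : Int)
  let phones : Int := ((candidates.filter (fun c => pvTruthyGet c "phone_number")).length : Int)
  let full : Int := ((candidates.filter pvFullContext).length : Int)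
  [("candidates_with_names", names), ("candidates_with_titles", titles),
   ("candidates_with_departments", departments), ("candidates_with_phones", phones),
   ("candidates_with_full_context", full)]

-- ===== PRECONDITION & SPEC =====
def Spec_analyze_context_richness_py (candidates : List (List (String × String))) (out : List (String × Int)) : Prop := out = analyze_context_richness_py_alt candidates
instance (candidates : List (List (String × String))) (out : List (String × Int)) : Decidable (Spec_analyze_context_richness_py candidates out) := by unfold Spec_analyze_context_richness_py; infer_instance

-- ===== CLAIM (what is proved, stated in full; the proofs are below) =====
def Claim_equal_analyze_context_richness_py : Prop := ∀ (candidates : List (List (String × String))), Dom_analyze_context_richness_py candidates → Spec_analyze_context_richness_py candidates (analyze_context_richness_py candidates)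

-- ===== LEMMAS AND PROOFS =====

-- one loop step on the five-counter dict adds the per-candidate indicator to each counter
theorem pv_step (a b c d e : Int) (x : List (String × String)) :
    (let d0 : PySem.Dict String Int := PySem.Dict.mk
       [("candidates_with_names", a), ("candidates_with_titles", b),
        ("candidates_with_departments", c), ("candidates_with_phones", d),
        ("candidates_with_full_context", e)]
     let d0 := if pvTruthyGet x "associated_name" then d0.modify "candidates_with_names" 0 (· + 1) else d0
     let d0 := if pvTruthyGet x "associated_title" then d0.modify "candidates_with_titles" 0 (· + 1) else d0
     let d0 := if pvTruthyGet x "associated_department" then d0.modify "candidates_with_departments" 0 (· + 1) else d0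
     let d0 := if pvTruthyGet x "phone_number" then d0.modify "candidates_with_phones" 0 (· + 1) else d0
     let context_count : Int :=
       (if pvTruthyGet x "associated_name" then 1 else 0) +
       (if pvTruthyGet x "associated_title" then 1 else 0) +
       (if pvTruthyGet x "associated_department" then 1 else 0) +
       (if pvTruthyGet x "phone_number" then 1 else 0)
     if context_count ≥ 2 then d0.modify "candidates_with_full_context" 0 (· + 1) else d0)
    = PySem.Dict.mk
       [("candidates_with_names", a + (if pvTruthyGet x "associated_name" then 1 else 0)),
        ("candidates_with_titles", b + (if pvTruthyGet x "associated_title" then 1 else 0)),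
        ("candidates_with_departments", c + (if pvTruthyGet x "associated_department" then 1 else 0)),
        ("candidates_with_phones", d + (if pvTruthyGet x "phone_number" then 1 else 0)),
        ("candidates_with_full_context", e + (if pvFullContext x then 1 else 0))] := by
  simp only [pvFullContext]
  by_cases h1 : pvTruthyGet x "associated_name" <;>
  by_cases h2 : pvTruthyGet x "associated_title" <;>
  by_cases h3 : pvTruthyGet x "associated_department" <;>
  by_cases h4 : pvTruthyGet x "phone_number" <;>
  simp [h1, h2, h3, h4, PySem.Dict.modify, PySem.Dict.contains, PySem.Dict.getD,
        PySem.Dict.get?, PySem.Dict.insert]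

theorem pv_loop (l : List (List (String × String))) : ∀ (a b c d e : Int),
    (l.foldl (fun d candidate =>
      let d := if pvTruthyGet candidate "associated_name" then d.modify "candidates_with_names" 0 (· + 1) else d
      let d := if pvTruthyGet candidate "associated_title" then d.modify "candidates_with_titles" 0 (· + 1) else d
      let d := if pvTruthyGet candidate "associated_department" then d.modify "candidates_with_departments" 0 (· + 1) else d
      let d := if pvTruthyGet candidate "phone_number" then d.modify "candidates_with_phones" 0 (· + 1) else d
      let context_count : Int :=
        (if pvTruthyGet candidate "associated_name" then 1 else 0) +
        (if pvTruthyGet candidate "associated_title" then 1 else 0) +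
        (if pvTruthyGet candidate "associated_department" then 1 else 0) +
        (if pvTruthyGet candidate "phone_number" then 1 else 0)
      if context_count ≥ 2 then d.modify "candidates_with_full_context" 0 (· + 1) else d)
      (PySem.Dict.mk
        [("candidates_with_names", a), ("candidates_with_titles", b),
         ("candidates_with_departments", c), ("candidates_with_phones", d),
         ("candidates_with_full_context", e)])).items
    = [("candidates_with_names", a + ((l.filter (fun c => pvTruthyGet c "associated_name")).length : Int)),
       ("candidates_with_titles", b + ((l.filter (fun c => pvTruthyGet c "associated_title")).length : Int)),
       ("candidates_with_departments", c + ((l.filter (fun c => pvTruthyGet c "associated_department")).length : Int)),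
       ("candidates_with_phones", d + ((l.filter (fun c => pvTruthyGet c "phone_number")).length : Int)),
       ("candidates_with_full_context", e + ((l.filter pvFullContext).length : Int))] := by
  induction l with
  | nil => intro a b c d e; simp
  | cons x l ih =>
    intro a b c d e
    rw [List.foldl_cons, pv_step, ih]
    by_cases h1 : pvTruthyGet x "associated_name" <;>
    by_cases h2 : pvTruthyGet x "associated_title" <;>
    by_cases h3 : pvTruthyGet x "associated_department" <;>
    by_cases h4 : pvTruthyGet x "phone_number" <;>
    by_cases h5 : pvFullContext x <;>
    simp [h1, h2, h3, h4, h5] <;> omega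

-- ===== VERDICT (by name: the statement is the Claim_ definition above) =====
theorem analyze_context_richness_py_spec : Claim_equal_analyze_context_richness_py := by
  intro candidates _
  show analyze_context_richness_py candidates = analyze_context_richness_py_alt candidates
  unfold analyze_context_richness_py analyze_context_richness_py_alt
  rw [pv_loop]
  simp
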